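-- pv_equiv track=rewrite | github.com/jessecross/adventOfCode2024 | bin/day_02.py | is_monotonic_safe
-- ===== SOURCE A (Python) =====
-- def is_increasing(i: int, j: int) -> bool:
--     return i < j
--
-- def is_decreasing(i: int, j: int) -> bool:
--     return i > j
--
-- def is_monotonic_safe(report: list) -> bool:
--     all_increasing = all(
--         is_increasing(report[i - 1], report[i]) for i in range(1, len(report))
--     )
--     all_decreasing = all(
--         is_decreasing(report[i - 1], report[i]) for i in range(1, len(report))
--     )
--     return (all_increasing or all_decreasing) and not (
--         all_increasing and all_decreasing
--     )
-- ===== SOURCE B (Python) =====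
-- def is_monotonic_safe(report: list) -> bool:
--     distinct = len(set(report)) == len(report)
--     inc = distinct and report == sorted(report)
--     dec = distinct and report == sorted(report, reverse=True)
--     return inc != dec
-- ===== Notes on version B (the rewrite author's own statement) =====
-- stated objective: idiomatic
-- what changed: Replaces A's two index-based scans over adjacent pairs (via range(1, len) and helper comparators) with a sort-and-distinctness formulation: the report is strictly monotonic iff it equals its sorted (or reverse-sorted) version and set(report) has full length.
import Mathlib
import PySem

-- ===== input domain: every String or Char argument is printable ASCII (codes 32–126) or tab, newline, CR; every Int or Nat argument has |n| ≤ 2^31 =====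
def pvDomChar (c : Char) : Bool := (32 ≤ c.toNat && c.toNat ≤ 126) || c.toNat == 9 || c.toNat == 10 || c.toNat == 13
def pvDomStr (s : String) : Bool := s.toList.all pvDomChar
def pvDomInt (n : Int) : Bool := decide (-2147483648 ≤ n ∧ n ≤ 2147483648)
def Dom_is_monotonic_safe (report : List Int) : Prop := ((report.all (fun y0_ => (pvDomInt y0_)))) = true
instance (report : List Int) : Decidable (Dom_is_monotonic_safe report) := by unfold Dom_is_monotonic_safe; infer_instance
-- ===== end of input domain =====

-- B replaces A's two index-based adjacent-pair scans by a sort-and-distinctness check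
-- (report equals its sorted version, and set(report) has full length); objective: idiomatic.

-- ===== PORT A =====
def is_increasing (i j : Int) : Bool := decide (i < j)

def is_decreasing (i j : Int) : Bool := decide (i > j)

-- indices i-1, i are always in range (1 ≤ i < len), so pyGetD is exact here
def is_monotonic_safe (report : List Int) : Bool :=
  let all_increasing := (PySem.List.pyRange 1 (report.length : Int) 1).all
    (fun i => is_increasing (PySem.List.pyGetD report (i - 1) 0) (PySem.List.pyGetD report i 0))
  let all_decreasing := (PySem.List.pyRange 1 (report.length : Int) 1).all
    (fun i => is_decreasing (PySem.List.pyGetD report (i - 1) 0) (PySem.List.pyGetD report i 0))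
  (all_increasing || all_decreasing) && !(all_increasing && all_decreasing)

-- ===== PORT B =====
def is_monotonic_safe_alt (report : List Int) : Bool :=
  let distinct := PySem.Set.len (PySem.Set.ofList report) == (report.length : Int)
  let inc := distinct && (report == PySem.List.sorted report (fun x => x))
  let dec := distinct && (report == PySem.List.sorted report (fun x => x) true)
  inc != dec

-- ===== PRECONDITION & SPEC =====
def Spec_is_monotonic_safe (report : List Int) (out : Bool) : Prop := out = is_monotonic_safe_alt report
instance (report : List Int) (out : Bool) : Decidable (Spec_is_monotonic_safe report out) := by unfold Spec_is_monotonic_safe; infer_instance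

-- ===== CLAIM (what is proved, stated in full; the proofs are below) =====
def Claim_equal_is_monotonic_safe : Prop := ∀ (report : List Int), Dom_is_monotonic_safe report → Spec_is_monotonic_safe report (is_monotonic_safe report)

-- ===== LEMMAS AND PROOFS =====

-- A's generator over range(1, len): all adjacent pairs satisfy f
theorem pv_all_adjacent_iff (report : List Int) (f : Int → Int → Bool) :
    ((PySem.List.pyRange 1 (report.length : Int) 1).all
      (fun i => f (PySem.List.pyGetD report (i - 1) 0) (PySem.List.pyGetD report i 0)) = true)
    ↔ ∀ (k : Nat), k + 1 < report.length → f (report.getD k 0) (report.getD (k+1) 0) = true := by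
  rw [List.all_eq_true]
  constructor
  · intro h k hk
    have hm : ((k : Int) + 1) ∈ PySem.List.pyRange 1 (report.length : Int) 1 :=
      PySem.List.mem_pyRange_one.mpr (by constructor <;> omega)
    have := h _ hm
    simp only [PySem.List.pyGetD_of_nonneg _ _ (by omega : (0:Int) ≤ (k : Int) + 1 - 1),
      PySem.List.pyGetD_of_nonneg _ _ (by omega : (0:Int) ≤ (k : Int) + 1)] at this
    have e1 : ((k : Int) + 1 - 1).toNat = k := by omega
    have e2 : ((k : Int) + 1).toNat = k + 1 := by omega
    rwa [e1, e2] at this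
  · intro h i hi
    obtain ⟨h1, h2⟩ := PySem.List.mem_pyRange_one.mp hi
    have hk : (i.toNat - 1) + 1 < report.length := by omega
    have := h (i.toNat - 1) hk
    simp only [PySem.List.pyGetD_of_nonneg _ _ (by omega : (0:Int) ≤ i - 1),
      PySem.List.pyGetD_of_nonneg _ _ (by omega : (0:Int) ≤ i)]
    have e1 : (i - 1).toNat = i.toNat - 1 := by omega
    have e2 : i.toNat = (i.toNat - 1) + 1 := by omega
    rw [e1, e2]
    exact this

theorem pv_adjacent_iff_pairwise (report : List Int) (R : Int → Int → Prop) [Trans R R R]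
    [DecidableRel R] :
    (∀ (k : Nat), k + 1 < report.length → decide (R (report.getD k 0) (report.getD (k+1) 0)) = true)
    ↔ List.Pairwise R report := by
  rw [← List.isChain_iff_pairwise, List.isChain_iff_getElem]
  constructor
  · intro h i hi
    have := h i hi
    rwa [List.getD_eq_getElem _ _ (by omega), List.getD_eq_getElem _ _ hi,
      decide_eq_true_eq] at this
  · intro h k hk
    rw [List.getD_eq_getElem _ _ (by omega), List.getD_eq_getElem _ _ hk,
      decide_eq_true_eq]
    exact h k hk

-- len(set(xs)) == len(xs) characterises distinctness
theorem pv_ofList_length_eq_iff (xs : List Int) :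
    (PySem.Set.ofList xs).length = xs.length ↔ xs.Nodup := by
  constructor
  · induction xs with
    | nil => simp
    | cons x xs ih =>
      intro h
      rw [PySem.Set.ofList_cons] at h
      simp only [List.length_cons, PySem.Set.discard] at h
      have hle1 : (PySem.Set.ofList xs).length ≤ xs.length := PySem.Set.length_ofList_le xs
      have hle2 : (List.filter (fun y => !y == x) (PySem.Set.ofList xs)).length
          ≤ (PySem.Set.ofList xs).length := List.length_filter_le _ _
      have hx : x ∉ PySem.Set.ofList xs := by
        intro hm
        have hlt : (List.filter (fun y => !y == x) (PySem.Set.ofList xs)).length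
            < (PySem.Set.ofList xs).length :=
          List.length_filter_lt_length_iff_exists.mpr ⟨x, hm, by simp⟩
        omega
      exact List.nodup_cons.mpr ⟨by simpa [PySem.Set.mem_ofList] using hx, ih (by omega)⟩
  · intro h
    rw [PySem.Set.ofList_eq_self_of_nodup xs h]

theorem pv_sorted_self_iff (xs : List Int) :
    (xs = PySem.List.sorted xs (fun x => x)) ↔ List.Pairwise (· ≤ ·) xs := by
  constructor
  · intro h
    have := PySem.List.sorted_pairwise xs (fun x => x)
    rwa [← h] at this
  · intro h
    exact (PySem.List.sorted_eq_self_of_pairwise xs _ h).symm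

theorem pv_sorted_rev_self_iff (xs : List Int) :
    (xs = PySem.List.sorted xs (fun x => x) true) ↔ List.Pairwise (fun a b => b ≤ a) xs := by
  constructor
  · intro h
    have := PySem.List.sorted_pairwise_rev xs (fun x => x)
    rwa [← h] at this
  · intro h
    exact (PySem.List.sorted_rev_eq_self_of_pairwise xs _ h).symm

theorem pv_pairwise_lt_iff (xs : List Int) :
    List.Pairwise (· < ·) xs ↔ List.Pairwise (· ≤ ·) xs ∧ xs.Nodup := by
  constructor
  · intro h
    exact ⟨h.imp (fun hab => le_of_lt hab), h.imp (fun hab => ne_of_lt hab)⟩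
  · rintro ⟨h1, h2⟩
    exact (h1.and h2).imp (fun ⟨ha, hb⟩ => lt_of_le_of_ne ha hb)

theorem pv_pairwise_gt_iff (xs : List Int) :
    List.Pairwise (fun a b : Int => a > b) xs ↔ List.Pairwise (fun a b : Int => b ≤ a) xs ∧ xs.Nodup := by
  constructor
  · intro h
    exact ⟨h.imp (fun hab => le_of_lt hab), h.imp (fun hab => (ne_of_lt hab).symm)⟩
  · rintro ⟨h1, h2⟩
    exact (h1.and h2).imp (fun ⟨ha, hb⟩ => lt_of_le_of_ne ha (Ne.symm hb))

theorem pv_bool_xor (a b : Bool) : ((a || b) && !(a && b)) = (a != b) := by cases a <;> cases b <;> rfl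

-- ===== VERDICT (by name: the statement is the Claim_ definition above) =====
theorem is_monotonic_safe_spec : Claim_equal_is_monotonic_safe := by
  intro report _
  show is_monotonic_safe report = is_monotonic_safe_alt report
  unfold is_monotonic_safe is_monotonic_safe_alt
  simp only []
  have einc : ((PySem.List.pyRange 1 (report.length : Int) 1).all
      (fun i => is_increasing (PySem.List.pyGetD report (i - 1) 0) (PySem.List.pyGetD report i 0)))
      = ((PySem.Set.len (PySem.Set.ofList report) == (report.length : Int)) &&
        (report == PySem.List.sorted report (fun x => x))) := by
    rw [Bool.eq_iff_iff]
    rw [pv_all_adjacent_iff report is_increasing]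
    unfold is_increasing
    rw [pv_adjacent_iff_pairwise report (· < ·), pv_pairwise_lt_iff]
    simp only [Bool.and_eq_true, beq_iff_eq, PySem.Set.len, ← pv_sorted_self_iff,
      ← pv_ofList_length_eq_iff]
    constructor
    · rintro ⟨h1, h2⟩; exact ⟨by exact_mod_cast h2, h1⟩
    · rintro ⟨h1, h2⟩; exact ⟨h2, by exact_mod_cast h1⟩
  have edec : ((PySem.List.pyRange 1 (report.length : Int) 1).all
      (fun i => is_decreasing (PySem.List.pyGetD report (i - 1) 0) (PySem.List.pyGetD report i 0)))
      = ((PySem.Set.len (PySem.Set.ofList report) == (report.length : Int)) &&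
        (report == PySem.List.sorted report (fun x => x) true)) := by
    rw [Bool.eq_iff_iff]
    rw [pv_all_adjacent_iff report is_decreasing]
    unfold is_decreasing
    rw [pv_adjacent_iff_pairwise report (· > ·), pv_pairwise_gt_iff]
    simp only [Bool.and_eq_true, beq_iff_eq, PySem.Set.len, ← pv_sorted_rev_self_iff,
      ← pv_ofList_length_eq_iff]
    constructor
    · rintro ⟨h1, h2⟩; exact ⟨by exact_mod_cast h2, h1⟩
    · rintro ⟨h1, h2⟩; exact ⟨h2, by exact_mod_cast h1⟩
  rw [einc, edec, pv_bool_xor]
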